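-- pv_equiv track=rewrite | github.com/ayush-git-SP/samplingSDK | sampling_sdk/HelperScripts.py | stage_table_resampling
-- ===== SOURCE A (Python) =====
-- def stage_table_resampling(table_name):
--     """
--     Generates a staged table name for resampling purposes.
--     Args:
--         table_name (str): The base name of the table.
--     Returns:
--         tuple: A tuple containing the staged table name, the stage number, and
--                the stage identifier.
--     """
--     txt = table_name[::-1]
--     for i in range(len(table_name)):
--         if txt[i] == "_" or ord(txt[i]) < 48 or ord(txt[i]) > 57:
--             break
--     if txt[i] == "_" and i != 0:
--         txt = txt[0:i]
--         txt = txt[::-1]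
--         stage_numb = int(txt) + 1
--         txt = table_name[0: len(table_name) - 1 - i] + "_" + str(stage_numb)
--         x = "_" + str(stage_numb)
--         return txt, stage_numb, x
--     else:
--         stage_numb = 1
--         txt = table_name + "_" + str(stage_numb)
--         x = "_" + str(stage_numb)
--         return txt, stage_numb, x
-- ===== SOURCE B (Python) =====
-- def stage_table_resampling(table_name):
--     """Split-and-validate re-implementation: rsplit on the last '_' instead of
--     reversing the string and scanning indices by hand."""
--     parts = table_name.rsplit('_', 1)
--     if len(parts) == 2 and parts[1] != '' and all(c in '0123456789' for c in parts[1]):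
--         stage_numb = int(parts[1]) + 1
--         base = parts[0]
--     else:
--         stage_numb = 1
--         base = table_name
--     x = '_' + str(stage_numb)
--     return base + x, stage_numb, x
-- ===== Notes on version B (the rewrite author's own statement) =====
-- stated objective: simpler
-- what changed: Replaces A's string reversal plus manual reverse index scan (with leftover loop-variable semantics) by a single rsplit on the last underscore followed by an explicit ASCII-digit validation of the suffix.
import Mathlib
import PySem

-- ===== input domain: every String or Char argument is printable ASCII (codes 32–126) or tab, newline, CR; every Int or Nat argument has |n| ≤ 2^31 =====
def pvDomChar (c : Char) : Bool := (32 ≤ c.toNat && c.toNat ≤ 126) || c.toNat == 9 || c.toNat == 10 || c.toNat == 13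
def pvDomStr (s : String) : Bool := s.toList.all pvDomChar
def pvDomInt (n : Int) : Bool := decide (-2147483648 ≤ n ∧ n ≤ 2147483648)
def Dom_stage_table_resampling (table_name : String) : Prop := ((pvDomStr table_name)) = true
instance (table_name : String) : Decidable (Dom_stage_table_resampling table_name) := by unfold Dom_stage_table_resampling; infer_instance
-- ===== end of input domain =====

-- B replaces A's string reversal + manual reverse index scan by an rsplit on the
-- last '_' with an explicit ASCII-digit check of the suffix (simpler; same cost).


-- ===== PORT A =====
-- the loop's break test: txt[i] == "_" or ord(txt[i]) < 48 or ord(txt[i]) > 57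
def pvCondA (c : Char) : Bool := c == '_' || decide (c.toNat < 48) || decide (57 < c.toNat)

-- `for i in range(len(table_name)): if <break test>: break` — returns the value i
-- holds after the loop: the break index, or len-1 when the loop runs to completion
-- (Python leaves the last tried index in i). Exact for nonempty input (Pre_).
def pvScanA : List Char → Nat → Nat
  | [], i => i - 1
  | c :: rest, i => if pvCondA c then i else pvScanA rest (i + 1)

def stage_table_resampling (table_name : String) : String × Int × String :=
  let cs := table_name.toList
  let txt := cs.reverse                        -- table_name[::-1]
  let i := pvScanA txt 0
  -- txt[i]: pyGetD with a dummy default; always in range for nonempty input (Pre_)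
  if PySem.List.pyGetD txt (i : Int) ' ' = '_' ∧ i ≠ 0 then
    let sfx := (PySem.List.slice txt (some 0) (some (i : Int))).reverse   -- txt[0:i][::-1]
    -- int(txt): in this branch sfx is a nonempty digit string, so the getD 0 is unreachable
    let stage_numb := (PySem.Int.ofChars? sfx).getD 0 + 1
    let name := PySem.List.slice cs (some 0) (some ((cs.length : Int) - 1 - (i : Int)))
                  ++ '_' :: PySem.Int.toChars stage_numb
    (String.ofList name, stage_numb, String.ofList ('_' :: PySem.Int.toChars stage_numb))
  else
    (String.ofList (cs ++ '_' :: PySem.Int.toChars 1), 1, String.ofList ('_' :: PySem.Int.toChars 1))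

-- ===== PORT B =====
-- c in '0123456789'
def pvIsDigitB (c : Char) : Bool := ['0','1','2','3','4','5','6','7','8','9'].contains c

-- table_name.rsplit('_', 1): `some (p, s)` = the two-element result [p, s] split at the
-- last '_', `none` = no '_' (one-element result). Hand-ported (PySem has no rsplit); exact.
def pvRsplitLast : List Char → Option (List Char × List Char)
  | [] => none
  | c :: rest =>
    match pvRsplitLast rest with
    | some (p, s) => some (c :: p, s)
    | none => if c == '_' then some ([], rest) else none

def stage_table_resampling_alt (table_name : String) : String × Int × String :=
  let cs := table_name.toList
  match pvRsplitLast cs with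
  | some (p, s) =>
    if s ≠ [] ∧ s.all pvIsDigitB then
      let stage_numb := (PySem.Int.ofChars? s).getD 0 + 1   -- int(parts[1]); digits only, never raises
      (String.ofList (p ++ '_' :: PySem.Int.toChars stage_numb), stage_numb,
        String.ofList ('_' :: PySem.Int.toChars stage_numb))
    else
      (String.ofList (cs ++ '_' :: PySem.Int.toChars 1), 1, String.ofList ('_' :: PySem.Int.toChars 1))
  | none => (String.ofList (cs ++ '_' :: PySem.Int.toChars 1), 1, String.ofList ('_' :: PySem.Int.toChars 1))

-- ===== PRECONDITION & SPEC =====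
-- Pre_ excludes only the empty string, on which A raises UnboundLocalError (the loop variable is never bound).
def Pre_stage_table_resampling (table_name : String) : Prop := table_name ≠ ""
instance (table_name : String) : Decidable (Pre_stage_table_resampling table_name) := by unfold Pre_stage_table_resampling; infer_instance
def pvWitness_stage_table_resampling : String := "events_3"

def Spec_stage_table_resampling (table_name : String) (out : String × Int × String) : Prop := out = stage_table_resampling_alt table_name
instance (table_name : String) (out : String × Int × String) : Decidable (Spec_stage_table_resampling table_name out) := by unfold Spec_stage_table_resampling; infer_instance

-- ===== CLAIM (what is proved, stated in full; the proofs are below) =====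
def Claim_equal_stage_table_resampling : Prop := ∀ (table_name : String), Dom_stage_table_resampling table_name → Pre_stage_table_resampling table_name → Spec_stage_table_resampling table_name (stage_table_resampling table_name)

-- ===== LEMMAS AND PROOFS =====

theorem char_eq_iff_toNat (c d : Char) : (c = d) ↔ c.toNat = d.toNat :=
  eq_iff_eq_of_cmp_eq_cmp rfl

-- the two digit tests agree: not-(break test) = membership in '0123456789'
theorem notCondA (c : Char) : (!pvCondA c) = pvIsDigitB c := by
  rw [Bool.eq_iff_iff]
  simp only [pvCondA, pvIsDigitB, List.contains_eq_mem, List.mem_cons, List.not_mem_nil, or_false,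
    Bool.not_or, Bool.and_eq_true, Bool.not_eq_eq_eq_not, Bool.not_true, beq_eq_false_iff_ne,
    decide_eq_false_iff_not, not_lt, decide_eq_true_eq, ne_eq, char_eq_iff_toNat]
  simp only [show ('_').toNat = 95 from rfl, show ('0').toNat = 48 from rfl,
    show ('1').toNat = 49 from rfl, show ('2').toNat = 50 from rfl, show ('3').toNat = 51 from rfl,
    show ('4').toNat = 52 from rfl, show ('5').toNat = 53 from rfl, show ('6').toNat = 54 from rfl,
    show ('7').toNat = 55 from rfl, show ('8').toNat = 56 from rfl, show ('9').toNat = 57 from rfl]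
  omega

theorem pvScanA_shift (t : List Char) (ht : t ≠ []) (i : Nat) :
    pvScanA t (i + 1) = pvScanA t i + 1 := by
  induction t generalizing i with
  | nil => exact absurd rfl ht
  | cons c rest ih =>
    by_cases h : pvCondA c
    · simp [pvScanA, h]
    · rcases eq_or_ne rest [] with rfl | hr
      · simp [pvScanA, h]
      · simp [pvScanA, h, ih hr]

-- the loop breaks at the first non-digit position (when one exists)
theorem pvScanA_lt (r : List Char)
    (h : (r.takeWhile (fun c => !pvCondA c)).length < r.length) :
    pvScanA r 0 = (r.takeWhile (fun c => !pvCondA c)).length := by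
  induction r with
  | nil => simp at h
  | cons c rest ih =>
    by_cases hc : pvCondA c
    · simp [pvScanA, hc, List.takeWhile]
    · have hr : rest ≠ [] := by
        intro h0; subst h0; simp [List.takeWhile, hc] at h
      have h' : (rest.takeWhile (fun c => !pvCondA c)).length < rest.length := by
        simp [List.takeWhile, hc] at h ⊢; omega
      simp [pvScanA, hc, List.takeWhile, pvScanA_shift rest hr, ih h']

-- when every char is a digit the loop runs out, leaving i = len - 1
theorem pvScanA_all (r : List Char) (hr : r ≠ [])
    (h : (r.takeWhile (fun c => !pvCondA c)).length = r.length) :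
    pvScanA r 0 = r.length - 1 := by
  induction r with
  | nil => exact absurd rfl hr
  | cons c rest ih =>
    have hc : ¬ pvCondA c = true := by
      intro hc
      simp [List.takeWhile, hc] at h
    rcases eq_or_ne rest [] with rfl | hraux
    · simp [pvScanA, hc]
    · have h' : (rest.takeWhile (fun c => !pvCondA c)).length = rest.length := by
        simp [List.takeWhile, hc] at h; omega
      have hlen : 0 < rest.length := List.length_pos_of_ne_nil hraux
      simp [pvScanA, hc, pvScanA_shift rest hraux, ih hraux h']
      omega

theorem pvRsplitLast_none (cs : List Char) : pvRsplitLast cs = none ↔ '_' ∉ cs := by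
  induction cs with
  | nil => simp [pvRsplitLast]
  | cons c rest ih =>
    simp only [pvRsplitLast]
    rcases h : pvRsplitLast rest with - | ⟨p, s⟩
    · rw [h] at ih
      by_cases hc : c = '_'
      · simp [hc, ih.mp rfl]
      · simp [hc, ih.mp rfl]
        exact fun h => hc h.symm
    · have : '_' ∈ rest := by
        by_contra hmem
        rw [← ih] at hmem; simp [hmem] at h
      simp [this]

theorem pvRsplitLast_some (cs p s : List Char) (h : pvRsplitLast cs = some (p, s)) :
    cs = p ++ '_' :: s ∧ '_' ∉ s := by
  induction cs generalizing p s with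
  | nil => simp [pvRsplitLast] at h
  | cons c rest ih =>
    simp only [pvRsplitLast] at h
    rcases h2 : pvRsplitLast rest with - | ⟨p', s'⟩
    · rw [h2] at h
      by_cases hc : c = '_'
      · simp [hc] at h
        obtain ⟨rfl, rfl⟩ := h
        exact ⟨by simp [hc], (pvRsplitLast_none rest).mp h2⟩
      · simp [hc] at h
    · rw [h2] at h
      simp only [Option.some.injEq, Prod.mk.injEq] at h
      obtain ⟨hp, hs⟩ := h
      subst hp; subst hs
      obtain ⟨he, hn⟩ := ih p' s' h2
      exact ⟨by simp [he], hn⟩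

theorem main_eq (table_name : String) (hpre : table_name ≠ "") :
    stage_table_resampling table_name = stage_table_resampling_alt table_name := by
  have hne : table_name.toList ≠ [] := by
    intro h0; apply hpre
    have := congrArg String.ofList h0
    simpa using this
  set cs := table_name.toList with hcs
  set r := cs.reverse with hrdef
  have hrne : r ≠ [] := by simpa [hrdef] using hne
  set k := (r.takeWhile (fun c => !pvCondA c)).length with hk
  have hkle : k ≤ r.length := by
    rw [hk]; exact (List.takeWhile_prefix _).length_le
  set i := pvScanA r 0 with hi
  have hilt : i < r.length := by
    rcases lt_or_eq_of_le hkle with hlt | heq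
    · rw [hi, pvScanA_lt r (by rw [← hk]; exact hlt), ← hk]; exact hlt
    · rw [hi, pvScanA_all r hrne (by rw [← hk]; exact heq)]
      have : 0 < r.length := List.length_pos_of_ne_nil hrne
      omega
  have hget : PySem.List.pyGetD r (i : Int) ' ' = (r[i]?).getD ' ' := by
    rw [PySem.List.pyGetD_natCast, List.getD_eq_getElem?_getD]
  have hgeti : r[i]? = some r[i] := List.getElem?_eq_getElem hilt
  cases hsplit : pvRsplitLast cs with
  | none =>
    have hus : '_' ∉ cs := (pvRsplitLast_none cs).mp hsplit
    have hcond : ¬ (PySem.List.pyGetD r (i : Int) ' ' = '_' ∧ i ≠ 0) := by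
      rintro ⟨h1, -⟩
      rw [hget, hgeti] at h1
      simp only [Option.getD_some] at h1
      have : r[i] ∈ r := List.getElem_mem hilt
      rw [h1] at this
      exact hus ((List.mem_reverse).mp (hrdef ▸ this))
    simp only [stage_table_resampling, stage_table_resampling_alt, ← hcs, ← hrdef, ← hi, hsplit,
      if_neg hcond]
  | some ps =>
    obtain ⟨p, s⟩ := ps
    obtain ⟨hcseq, hs⟩ := pvRsplitLast_some cs p s hsplit
    have hrsplit : r = s.reverse ++ '_' :: p.reverse := by
      rw [hrdef, hcseq]; simp
    have hgetm : r[s.length]? = some '_' := by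
      rw [hrsplit, List.getElem?_append_right (by simp)]
      simp
    by_cases hd : s ≠ [] ∧ s.all pvIsDigitB
    · -- digit-suffix branch on both sides
      have hallpred : ∀ c ∈ s.reverse, (!pvCondA c) = true := by
        intro c hc
        rw [notCondA]
        exact List.all_eq_true.mp hd.2 c (List.mem_reverse.mp hc)
      have htw : r.takeWhile (fun c => !pvCondA c) = s.reverse := by
        rw [hrsplit, List.takeWhile_append]
        rw [List.takeWhile_eq_self_iff.mpr hallpred]
        simp [show pvCondA '_' = true from rfl]
      have hkval : k = s.length := by rw [hk, htw]; simp
      have hklt : k < r.length := by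
        have : r.length = s.length + 1 + p.length := by rw [hrsplit]; simp; omega
        omega
      have hieq : i = s.length := by
        rw [hi, pvScanA_lt r (by rw [← hk]; exact hklt), ← hk, hkval]
      have hsne : s.length ≠ 0 := by
        intro h0; exact hd.1 (List.eq_nil_iff_length_eq_zero.mpr h0)
      have hcond : PySem.List.pyGetD r (i : Int) ' ' = '_' ∧ i ≠ 0 := by
        refine ⟨?_, by rw [hieq]; exact hsne⟩
        rw [hget, hieq, hgetm]
        rfl
      have hslice : PySem.List.slice r (some 0) (some (i : Int)) = s.reverse := by
        rw [PySem.List.slice_zero_start, PySem.List.slice_to_natCast, hieq, hrsplit,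
          ← List.length_reverse (as := s), List.take_left]
      have hlencs : cs.length = p.length + 1 + s.length := by rw [hcseq]; simp; omega
      have hsliceP : PySem.List.slice cs (some 0) (some ((cs.length : Int) - 1 - (i : Int))) = p := by
        have harith : (cs.length : Int) - 1 - (i : Int) = (p.length : Int) := by
          rw [hieq, hlencs]; push_cast; ring
        rw [PySem.List.slice_zero_start, harith, PySem.List.slice_to_natCast, hcseq]
        exact List.take_left
      simp only [stage_table_resampling, stage_table_resampling_alt, ← hcs, ← hrdef, ← hi, hsplit,
        if_pos hcond, if_pos hd, hslice, hsliceP, List.reverse_reverse]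
    · -- else branch on both sides
      have hcond : ¬ (PySem.List.pyGetD r (i : Int) ' ' = '_' ∧ i ≠ 0) := by
        rintro ⟨h1, h2⟩
        rw [hget, hgeti] at h1
        simp only [Option.getD_some] at h1
        have husr : ('_' : Char) ∈ r := by rw [hrsplit]; simp
        have hklt : k < r.length := by
          rcases lt_or_eq_of_le hkle with hlt | heq
          · exact hlt
          · exfalso
            have htweq : r.takeWhile (fun c => !pvCondA c) = r :=
              List.IsPrefix.eq_of_length (List.takeWhile_prefix _) (hk ▸ heq)
            have := List.mem_takeWhile_imp (l := r) (p := fun c => !pvCondA c)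
              (by rw [htweq]; exact husr)
            simp [show pvCondA '_' = true from rfl] at this
        have hieqk : i = k := by rw [hi, pvScanA_lt r (by rw [← hk]; exact hklt), ← hk]
        have htwtake : r.takeWhile (fun c => !pvCondA c) = r.take k := by
          conv_rhs => rw [hk]
          exact List.prefix_iff_eq_take.mp (List.takeWhile_prefix _)
        have hkeq : k = s.length := by
          rcases Nat.lt_trichotomy k s.length with hlt | heq | hgt
          · exfalso
            have hlen : k < s.reverse.length := by simpa using hlt
            have : r[i]? = s.reverse[k]? := by
              rw [hieqk, hrsplit]; exact List.getElem?_append_left hlen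
            rw [hgeti, h1] at this
            exact hs (List.mem_reverse.mp (List.mem_of_getElem? this.symm))
          · exact heq
          · exfalso
            have hmem : ('_' : Char) ∈ r.take k := by
              apply List.mem_of_getElem? (i := s.length)
              rw [List.getElem?_take_of_lt hgt, hgetm]
            have := List.mem_takeWhile_imp (htwtake ▸ hmem)
            simp [show pvCondA '_' = true from rfl] at this
        apply hd
        constructor
        · intro h0; subst h0; simp at hkeq; omega
        · rw [List.all_eq_true]
          intro c hc
          rw [← notCondA]
          have hcm : c ∈ r.takeWhile (fun c => !pvCondA c) := by
            rw [htwtake, hkeq, hrsplit, ← List.length_reverse (as := s), List.take_left]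
            exact List.mem_reverse.mpr hc
          simpa using List.mem_takeWhile_imp hcm
      simp only [stage_table_resampling, stage_table_resampling_alt, ← hcs, ← hrdef, ← hi, hsplit,
        if_neg hcond, if_neg hd]

-- ===== VERDICT (by name: the statement is the Claim_ definition above) =====
theorem stage_table_resampling_spec : Claim_equal_stage_table_resampling := by
  intro table_name _ hpre
  unfold Spec_stage_table_resampling
  exact main_eq table_name hpre
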